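-- pv_equiv track=rewrite | github.com/Benjamin7991/My-Code-Wars-Solutions | 7KYU/StartWithAVowel.py | vowel_start
-- ===== SOURCE A (Python) =====
-- def vowel_start(st):
--     st = st.split()
--     st = ''.join(st)
--     vowels = 'aeiou'
--     ss = ''
--
--     for char in st:
--         if char.isalnum():
--             ss += char
--             ss = ss.lower()
--     for char in ss:
--         if char in vowels:
--             ss = ss.replace(char, ' ' + char)
--         ss= ss.strip()
--     res = ss.split()
--     return ' '.join(res)
-- ===== SOURCE B (Python) =====
-- def vowel_start(st):
--     vowels = 'aeiou'
--     words = []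
--     cur = ''
--     for ch in st:
--         if ch.isalnum():
--             ch = ch.lower()
--             if ch in vowels:
--                 if cur:
--                     words.append(cur)
--                 cur = ch
--             else:
--                 cur += ch
--     if cur:
--         words.append(cur)
--     return ' '.join(words)
-- ===== Notes on version B (the rewrite author's own statement) =====
-- stated objective: faster
-- what changed: A cleans the string and then, for every character, runs a whole-string replace() plus strip() and finally re-splits; B builds the word list directly in one left-to-right pass that starts a new word at each vowel, with no replace/strip/split passes.
import Mathlib
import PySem

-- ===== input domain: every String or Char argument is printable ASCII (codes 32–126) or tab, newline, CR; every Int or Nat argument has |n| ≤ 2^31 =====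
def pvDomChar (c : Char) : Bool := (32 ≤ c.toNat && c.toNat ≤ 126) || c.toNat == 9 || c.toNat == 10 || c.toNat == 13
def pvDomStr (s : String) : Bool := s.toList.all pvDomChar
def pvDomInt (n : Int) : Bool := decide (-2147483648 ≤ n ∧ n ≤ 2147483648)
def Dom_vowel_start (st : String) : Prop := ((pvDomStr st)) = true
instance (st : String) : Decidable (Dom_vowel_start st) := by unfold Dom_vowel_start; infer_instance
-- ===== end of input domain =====

-- B replaces A's quadratic replace/strip/split passes by one left-to-right pass that builds the word list directly; objective: faster.

-- ===== PORT A =====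
def vowelsConst : List Char := "aeiou".toList

-- body of A's first loop: if char.isalnum(): ss += char; ss = ss.lower()
def aClean (ss : List Char) (ch : Char) : List Char :=
  if PySem.Chars.isalnum ch then PySem.Chars.lower (ss ++ [ch]) else ss

-- body of A's second loop: if char in vowels: ss = ss.replace(char, ' '+char); ss = ss.strip()
def aMark (acc : List Char) (ch : Char) : List Char :=
  PySem.Chars.strip (if PySem.Chars.isIn [ch] vowelsConst then PySem.Chars.replace acc [ch] (' ' :: [ch]) else acc)

def vowel_start (st : String) : String :=
  let flat := PySem.Chars.join [] (PySem.Chars.split₀ st.toList)   -- st = ''.join(st.split())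
  let ss := flat.foldl aClean []
  let ss2 := ss.foldl aMark ss                                     -- for char in ss: ... (iterates the original ss)
  String.ofList (PySem.Chars.join [' '] (PySem.Chars.split₀ ss2))      -- ' '.join(ss.split())

-- ===== PORT B =====
-- inner body once the char is alnum and lowered: start a new word at a vowel, else extend the current word
def bCore (p : List (List Char) × List Char) (c : Char) : List (List Char) × List Char :=
  if PySem.Chars.isIn [c] vowelsConst then ((if p.2 = [] then p.1 else p.1 ++ [p.2]), [c])
  else (p.1, p.2 ++ [c])

def bStep (p : List (List Char) × List Char) (ch : Char) : List (List Char) × List Char :=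
  if PySem.Chars.isalnum ch then bCore p (PySem.Chars.lowerChar ch) else p

def vowel_start_alt (st : String) : String :=
  let p := st.toList.foldl bStep ([], [])
  let words := if p.2 = [] then p.1 else p.1 ++ [p.2]
  String.ofList (PySem.Chars.join [' '] words)

-- ===== PRECONDITION & SPEC =====
def Spec_vowel_start (st : String) (out : String) : Prop := out = vowel_start_alt st
instance (st : String) (out : String) : Decidable (Spec_vowel_start st out) := by unfold Spec_vowel_start; infer_instance

-- ===== CLAIM (what is proved, stated in full; the proofs are below) =====
def Claim_equal_vowel_start : Prop := ∀ (st : String), Dom_vowel_start st → Spec_vowel_start st (vowel_start st)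

-- ===== LEMMAS AND PROOFS =====

-- a string of c's chars, each preceded by the number of spaces the matching entry of b prescribes
def padB (b : List Nat) (c : List Char) : List Char :=
  (b.zip c).flatMap (fun p => List.replicate p.1 ' ' ++ [p.2])

-- add one space in front of every occurrence of x
def bumpB (x : Char) : List Nat → List Char → List Nat
  | n :: bs, y :: cs => (if y = x then n + 1 else n) :: bumpB x bs cs
  | b, _ => b

-- zero the head entry (the effect of strip on a padded string)
def zh : List Nat → List Nat
  | [] => []
  | _ :: bs => 0 :: bs

-- the words split₀ extracts from padB b c, cur being the word under construction
def cutGo : List Char → List Nat → List Char → List (List Char)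
  | cur, n :: bs, x :: cs =>
      if n = 0 then cutGo (cur ++ [x]) bs cs
      else (if cur = [] then [] else [cur]) ++ cutGo [x] bs cs
  | cur, _, _ => if cur = [] then [] else [cur]

-- the words B produces from the cleaned string
def Waux : List Char → List Char → List (List Char)
  | cur, [] => if cur = [] then [] else [cur]
  | cur, x :: cs =>
      if PySem.Chars.isIn [x] vowelsConst then (if cur = [] then [] else [cur]) ++ Waux [x] cs
      else Waux (cur ++ [x]) cs

theorem char_ofNat_toNat (n : Nat) (h : n < 55296) : (Char.ofNat n).toNat = n := by
  have hv : n.isValidChar := Or.inl h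
  unfold Char.ofNat
  simp [hv, Char.ofNatAux, Char.toNat]

theorem isupper_iff (c : Char) : PySem.Chars.isupper c = true ↔ (65 ≤ c.toNat ∧ c.toNat ≤ 90) := by
  unfold PySem.Chars.isupper
  simp only [Bool.and_eq_true, decide_eq_true_eq]
  constructor
  · rintro ⟨h1, h2⟩; exact ⟨h1, h2⟩
  · rintro ⟨h1, h2⟩; exact ⟨h1, h2⟩

theorem lowerChar_of_not_upper (c : Char) (h : PySem.Chars.isupper c = false) :
    PySem.Chars.lowerChar c = c := by
  unfold PySem.Chars.lowerChar; simp [h]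

theorem lowerChar_toNat_of_upper (c : Char) (h : PySem.Chars.isupper c = true) :
    (PySem.Chars.lowerChar c).toNat = c.toNat + 32 := by
  have hb := (isupper_iff c).mp h
  unfold PySem.Chars.lowerChar
  rw [if_pos h]
  exact char_ofNat_toNat _ (by omega)

theorem lowerChar_idem (c : Char) : PySem.Chars.lowerChar (PySem.Chars.lowerChar c) = PySem.Chars.lowerChar c := by
  by_cases h : PySem.Chars.isupper c = true
  · have ht := lowerChar_toNat_of_upper c h
    have hb := (isupper_iff c).mp h
    apply lowerChar_of_not_upper
    rw [Bool.eq_false_iff]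
    intro hu
    have := (isupper_iff _).mp hu
    omega
  · rw [lowerChar_of_not_upper c (Bool.eq_false_iff.mpr h)]
    exact lowerChar_of_not_upper c (Bool.eq_false_iff.mpr h)

theorem isalnum_bounds (c : Char) (h : PySem.Chars.isalnum c = true) :
    (48 ≤ c.toNat ∧ c.toNat ≤ 57) ∨ (65 ≤ c.toNat ∧ c.toNat ≤ 90) ∨ (97 ≤ c.toNat ∧ c.toNat ≤ 122) := by
  unfold PySem.Chars.isalnum PySem.Chars.isalpha PySem.Chars.isdigit PySem.Chars.islower at h
  rcases Bool.or_eq_true_iff.mp h with h' | h'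
  · rcases Bool.or_eq_true_iff.mp h' with h'' | h''
    · have := (isupper_iff c).mp h''
      omega
    · simp only [Bool.and_eq_true, decide_eq_true_eq] at h''
      right; right
      exact ⟨h''.1, h''.2⟩
  · simp only [Bool.and_eq_true, decide_eq_true_eq] at h'
    left
    exact ⟨h'.1, h'.2⟩

theorem isspace_false_of_bounds (c : Char)
    (h : (48 ≤ c.toNat ∧ c.toNat ≤ 57) ∨ (65 ≤ c.toNat ∧ c.toNat ≤ 90) ∨ (97 ≤ c.toNat ∧ c.toNat ≤ 122)) :
    PySem.Chars.isspace c = false := by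
  unfold PySem.Chars.isspace
  simp only [Bool.or_eq_false_iff, Bool.and_eq_false_iff, decide_eq_false_iff_not]
  omega

theorem isspace_false_of_alnum (c : Char) (h : PySem.Chars.isalnum c = true) :
    PySem.Chars.isspace c = false :=
  isspace_false_of_bounds c (isalnum_bounds c h)

theorem isspace_false_lower_of_alnum (c : Char) (h : PySem.Chars.isalnum c = true) :
    PySem.Chars.isspace (PySem.Chars.lowerChar c) = false := by
  apply isspace_false_of_bounds
  rcases isalnum_bounds c h with hb | hb | hb
  · rw [lowerChar_of_not_upper c]
    · left; exact hb
    · rw [Bool.eq_false_iff]; intro hu; have := (isupper_iff c).mp hu; omega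
  · have := lowerChar_toNat_of_upper c ((isupper_iff c).mpr hb)
    right; right; omega
  · rw [lowerChar_of_not_upper c]
    · right; right; exact hb
    · rw [Bool.eq_false_iff]; intro hu; have := (isupper_iff c).mp hu; omega

theorem isspace_space : PySem.Chars.isspace ' ' = true := by decide

theorem join_nil_flatten (parts : List (List Char)) : PySem.Chars.join [] parts = parts.flatten := by
  unfold PySem.Chars.join
  induction parts with
  | nil => simp [List.intercalate]
  | cons h t ih =>
    cases t with
    | nil => simp [List.intercalate]
    | cons h2 t2 => simp_all [List.intercalate, List.intersperse]

theorem split0_go_flatten (l : List Char) : ∀ (cur : List Char) (acc : List (List Char)),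
    (PySem.Chars.split₀.go l cur acc).flatten
      = acc.reverse.flatten ++ cur.reverse ++ l.filter (fun c => !PySem.Chars.isspace c) := by
  induction l with
  | nil =>
    intro cur acc
    unfold PySem.Chars.split₀.go
    by_cases h : cur = [] <;> simp [h]
  | cons c rest ih =>
    intro cur acc
    unfold PySem.Chars.split₀.go
    by_cases hs : PySem.Chars.isspace c = true
    · rw [if_pos hs]
      by_cases h : cur = []
      · simp [h, ih, hs]
      · simp [h, ih, hs]
    · rw [if_neg hs]
      rw [ih]
      simp at hs
      simp [hs]

theorem split0_flatten (l : List Char) :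
    (PySem.Chars.split₀ l).flatten = l.filter (fun c => !PySem.Chars.isspace c) := by
  unfold PySem.Chars.split₀
  simp [split0_go_flatten]

theorem aClean_def (ss : List Char) (ch : Char) :
  aClean ss ch = if PySem.Chars.isalnum ch then PySem.Chars.lower (ss ++ [ch]) else ss := rfl

theorem map_lower_idem (l : List Char) :
    (l.map PySem.Chars.lowerChar).map PySem.Chars.lowerChar = l.map PySem.Chars.lowerChar := by
  rw [List.map_map]
  exact List.map_congr_left (fun x _ => lowerChar_idem x)

theorem clean_fold (l : List Char) : ∀ (acc : List Char),
    l.foldl aClean (acc.map PySem.Chars.lowerChar)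
      = (acc ++ l.filter PySem.Chars.isalnum).map PySem.Chars.lowerChar := by
  induction l with
  | nil => intro acc; simp
  | cons c rest ih =>
    intro acc
    simp only [List.foldl_cons, aClean_def]
    by_cases h : PySem.Chars.isalnum c = true
    · rw [if_pos h]
      have hl : PySem.Chars.lower (acc.map PySem.Chars.lowerChar ++ [c]) = (acc ++ [c]).map PySem.Chars.lowerChar := by
        unfold PySem.Chars.lower
        rw [List.map_append, List.map_append, map_lower_idem]
      rw [hl, ih (acc ++ [c])]
      simp [h]
    · rw [if_neg h, ih acc]
      simp only [Bool.not_eq_true] at h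
      simp [h]

theorem repl_go (x : Char) (new : List Char) :
    ∀ (s : List Char) (fuel : Nat) (acc : List Char), s.length ≤ fuel →
    PySem.Chars.replace.go [x] new fuel s acc
      = acc.reverse ++ s.flatMap (fun c => if c = x then new else [c]) := by
  intro s
  induction s with
  | nil =>
    intro fuel acc _
    unfold PySem.Chars.replace.go
    cases fuel <;> simp
  | cons c t ih =>
    intro fuel acc hf
    cases fuel with
    | zero => simp at hf
    | succ f =>
      unfold PySem.Chars.replace.go
      by_cases h : c = x
      · have hp : [x].isPrefixOf (c :: t) = true := by simp [List.isPrefixOf, h]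
        rw [if_pos hp, show List.drop [x].length (c :: t) = t from rfl]
        rw [ih f (new.reverse ++ acc) (by simpa using Nat.le_of_succ_le_succ hf)]
        simp [h]
      · have hp : ¬ ([x].isPrefixOf (c :: t) = true) := by
          simp [List.isPrefixOf]
          exact fun hh => h hh.symm
        rw [if_neg hp]
        rw [ih f (c :: acc) (by simpa using Nat.le_of_succ_le_succ hf)]
        simp [h]

theorem replace_single (x : Char) (new s : List Char) :
    PySem.Chars.replace s [x] new = s.flatMap (fun c => if c = x then new else [c]) := by
  unfold PySem.Chars.replace
  rw [if_neg (by simp)]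
  exact repl_go x new s s.length [] (le_refl _)

theorem pad_zero (c : List Char) : padB (List.replicate c.length 0) c = c := by
  induction c with
  | nil => rfl
  | cons x cs ih => simp [padB, List.replicate_succ, List.zip_cons_cons, List.flatMap_cons] at ih ⊢; exact ih

theorem flatMap_replicate_space (x : Char) (hx : x ≠ ' ') (new : List Char) (n : Nat) :
    (List.replicate n ' ').flatMap (fun c => if c = x then new else [c]) = List.replicate n ' ' := by
  induction n with
  | zero => rfl
  | succ m ih =>
    simp only [List.replicate_succ, List.flatMap_cons, ih]
    rw [if_neg (by exact fun hh => hx hh.symm)]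
    rfl

theorem replace_pad (x : Char) (hx : x ≠ ' ') : ∀ (b : List Nat) (c : List Char), b.length = c.length →
    PySem.Chars.replace (padB b c) [x] (' ' :: [x]) = padB (bumpB x b c) c := by
  intro b
  induction b with
  | nil =>
    intro c hlen
    have : c = [] := by cases c <;> simp_all
    subst this; rfl
  | cons n bs ih =>
    intro c hlen
    cases c with
    | nil => simp at hlen
    | cons y cs =>
      rw [replace_single]
      simp only [padB, bumpB, List.zip_cons_cons, List.flatMap_cons, List.flatMap_append]
      have hsp := flatMap_replicate_space x hx (' ' :: [x]) n
      have hrec := ih cs (by simpa using hlen)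
      rw [replace_single] at hrec
      simp only [padB] at hrec
      rw [hsp, hrec]
      by_cases hy : y = x
      · rw [if_pos hy, if_pos hy, hy]
        simp [List.replicate_succ']
      · rw [if_neg hy, if_neg hy]
        simp

theorem dropWhile_replicate_space (n : Nat) (l : List Char) :
    List.dropWhile PySem.Chars.isspace (List.replicate n ' ' ++ l) = List.dropWhile PySem.Chars.isspace l := by
  induction n with
  | zero => rfl
  | succ m ih => simp [List.replicate_succ, isspace_space, ih]

theorem rstrip_append_last (l : List Char) (z : Char) (hz : PySem.Chars.isspace z = false) :
    PySem.Chars.rstrip (l ++ [z]) = l ++ [z] := by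
  unfold PySem.Chars.rstrip
  rw [List.reverse_append]
  simp [hz]

theorem pad_last (b : List Nat) (c : List Char) : c ≠ [] → b.length = c.length →
    ∃ l z, padB b c = l ++ [z] ∧ z ∈ c := by
  induction c generalizing b with
  | nil => intro h; exact absurd rfl h
  | cons y cs ih =>
    intro _ hlen
    cases b with
    | nil => simp at hlen
    | cons n bs =>
      cases cs with
      | nil =>
        refine ⟨List.replicate n ' ', y, ?_, by simp⟩
        have : bs = [] := by simpa using hlen
        subst this
        simp [padB]
      | cons y2 cs2 =>
        obtain ⟨l, z, hpad, hz⟩ := ih bs (by simp) (by simpa using hlen)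
        refine ⟨List.replicate n ' ' ++ y :: l, z, ?_, by simp_all⟩
        simp only [padB, List.zip_cons_cons, List.flatMap_cons] at hpad ⊢
        rw [hpad]
        simp

theorem strip_pad (b : List Nat) (c : List Char) (hlen : b.length = c.length)
    (hc : ∀ y ∈ c, PySem.Chars.isspace y = false) :
    PySem.Chars.strip (padB b c) = padB (zh b) c := by
  cases c with
  | nil =>
    have : b = [] := by cases b <;> simp_all
    subst this
    rfl
  | cons y cs =>
    cases b with
    | nil => simp at hlen
    | cons n bs =>
      unfold PySem.Chars.strip PySem.Chars.lstrip
      have hpad : padB (n :: bs) (y :: cs) = List.replicate n ' ' ++ y :: padB bs cs := by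
        simp [padB, List.zip_cons_cons, List.flatMap_cons]
      have hpad0 : padB (zh (n :: bs)) (y :: cs) = y :: padB bs cs := by
        simp [zh, padB, List.zip_cons_cons, List.flatMap_cons]
      rw [hpad, hpad0, dropWhile_replicate_space]
      rw [List.dropWhile_cons_of_neg (by simp [hc y (by simp)])]
      obtain ⟨l, z, hlz, hzmem⟩ := pad_last (zh (n :: bs)) (y :: cs) (by simp) (by simpa [zh] using hlen)
      rw [hpad0] at hlz
      rw [hlz]
      exact rstrip_append_last l z (hc z hzmem)

theorem bumpB_length (x : Char) : ∀ (b : List Nat) (c : List Char),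
    (bumpB x b c).length = b.length := by
  intro b
  induction b with
  | nil => intro c; cases c <;> rfl
  | cons n bs ih =>
    intro c
    cases c with
    | nil => rfl
    | cons y cs => simp [bumpB, ih]

theorem bumpB_getD (x : Char) : ∀ (b : List Nat) (c : List Char), b.length = c.length →
    ∀ i, i < c.length →
    (bumpB x b c).getD i 0 = if c.getD i ' ' = x then b.getD i 0 + 1 else b.getD i 0 := by
  intro b
  induction b with
  | nil => intro c hlen i hi; rw [← hlen] at hi; simp at hi
  | cons n bs ih =>
    intro c hlen i hi
    cases c with
    | nil => simp at hi
    | cons y cs =>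
      cases i with
      | zero => simp [bumpB]
      | succ j =>
        simp only [bumpB, List.getD_cons_succ]
        exact ih cs (by simpa using hlen) j (by simpa using hi)

theorem zh_getD (b : List Nat) (i : Nat) : (zh b).getD i 0 = if i = 0 then 0 else b.getD i 0 := by
  cases b with
  | nil => cases i <;> simp [zh]
  | cons n bs => cases i <;> simp [zh]

theorem zh_length (b : List Nat) : (zh b).length = b.length := by
  cases b <;> simp [zh]

theorem aMark_def (acc : List Char) (ch : Char) :
    aMark acc ch = PySem.Chars.strip
      (if PySem.Chars.isIn [ch] vowelsConst then PySem.Chars.replace acc [ch] (' ' :: [ch]) else acc) := rfl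

theorem loop2 (c : List Char) (hc : ∀ x ∈ c, PySem.Chars.isspace x = false) :
    ∀ (r : List Char), (∀ x ∈ r, PySem.Chars.isspace x = false) →
    ∀ (b : List Nat), b.length = c.length → b.getD 0 0 = 0 →
    ∃ b', r.foldl aMark (padB b c) = padB b' c ∧ b'.length = c.length ∧ b'.getD 0 0 = 0 ∧
      (∀ i, i < c.length →
        ((b'.getD i 0 ≠ 0) ↔ (i ≠ 0 ∧ (b.getD i 0 ≠ 0 ∨
          (PySem.Chars.isIn [c.getD i ' '] vowelsConst = true ∧ c.getD i ' ' ∈ r))))) := by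
  intro r
  induction r with
  | nil =>
    intro _ b hlen hb0
    refine ⟨b, rfl, hlen, hb0, ?_⟩
    intro i hi
    constructor
    · intro hne
      refine ⟨?_, Or.inl hne⟩
      intro h0; subst h0; exact hne hb0
    · rintro ⟨_, hor⟩
      rcases hor with h | h
      · exact h
      · exact absurd h.2 (by simp)
  | cons x r' ih =>
    intro hr b hlen hb0
    have hx : x ≠ ' ' := by
      intro h
      have := hr x (by simp)
      rw [h, isspace_space] at this
      exact absurd this (by simp)
    rw [List.foldl_cons, aMark_def]
    by_cases hv : PySem.Chars.isIn [x] vowelsConst = true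
    · rw [if_pos hv, replace_pad x hx b c hlen,
        strip_pad (bumpB x b c) c (by rw [bumpB_length]; exact hlen) hc]
      obtain ⟨b', heq, hlen', hb0', hiff⟩ := ih (fun y hy => hr y (by simp [hy])) (zh (bumpB x b c))
        (by rw [zh_length, bumpB_length]; exact hlen) (by rw [zh_getD]; simp)
      refine ⟨b', heq, hlen', hb0', ?_⟩
      intro i hi
      rw [hiff i hi]
      constructor
      · rintro ⟨h0, hor⟩
        refine ⟨h0, ?_⟩
        rcases hor with h | h
        · rw [zh_getD, if_neg h0, bumpB_getD x b c hlen i hi] at h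
          by_cases hcx : c.getD i ' ' = x
          · exact Or.inr ⟨hcx ▸ hv, by rw [List.mem_cons]; exact Or.inl hcx⟩
          · rw [if_neg hcx] at h
            exact Or.inl h
        · exact Or.inr ⟨h.1, List.mem_cons_of_mem _ h.2⟩
      · rintro ⟨h0, hor⟩
        refine ⟨h0, ?_⟩
        rw [zh_getD, if_neg h0, bumpB_getD x b c hlen i hi]
        by_cases hcx : c.getD i ' ' = x
        · rw [if_pos hcx]; exact Or.inl (by omega)
        · rw [if_neg hcx]
          rcases hor with h | h
          · exact Or.inl h
          · rcases (by simpa using h.2 : c.getD i ' ' = x ∨ c.getD i ' ' ∈ r') with h2 | h2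
            · exact absurd h2 hcx
            · exact Or.inr ⟨h.1, h2⟩
    · rw [if_neg hv, strip_pad b c hlen hc]
      obtain ⟨b', heq, hlen', hb0', hiff⟩ := ih (fun y hy => hr y (by simp [hy])) (zh b)
        (by rw [zh_length]; exact hlen) (by rw [zh_getD]; simp)
      refine ⟨b', heq, hlen', hb0', ?_⟩
      intro i hi
      rw [hiff i hi]
      constructor
      · rintro ⟨h0, hor⟩
        refine ⟨h0, ?_⟩
        rcases hor with h | h
        · rw [zh_getD, if_neg h0] at h
          exact Or.inl h
        · exact Or.inr ⟨h.1, List.mem_cons_of_mem _ h.2⟩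
      · rintro ⟨h0, hor⟩
        refine ⟨h0, ?_⟩
        rw [zh_getD, if_neg h0]
        rcases hor with h | h
        · exact Or.inl h
        · rcases (by simpa using h.2 : c.getD i ' ' = x ∨ c.getD i ' ' ∈ r') with h2 | h2
          · exact absurd (h2 ▸ h.1) (by simp [hv])
          · exact Or.inr ⟨h.1, h2⟩

theorem go_replicate (n : Nat) (l : List Char) (a : List (List Char)) :
    PySem.Chars.split₀.go (List.replicate n ' ' ++ l) [] a = PySem.Chars.split₀.go l [] a := by
  induction n with
  | zero => rfl
  | succ m ih =>
    rw [List.replicate_succ, List.cons_append]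
    conv_lhs => unfold PySem.Chars.split₀.go
    simp [isspace_space, ih]

theorem cutGo_cons (cur : List Char) (n : Nat) (bs : List Nat) (x : Char) (cs : List Char) :
    cutGo cur (n :: bs) (x :: cs)
      = if n = 0 then cutGo (cur ++ [x]) bs cs
        else (if cur = [] then [] else [cur]) ++ cutGo [x] bs cs := rfl

theorem cutGo_base (cur : List Char) (b : List Nat) :
    cutGo cur b [] = if cur = [] then [] else [cur] := by
  cases b <;> rfl

theorem split_go_pad (c : List Char) (hc : ∀ x ∈ c, PySem.Chars.isspace x = false) :
    ∀ (b : List Nat), b.length = c.length → ∀ (r : List Char) (a : List (List Char)),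
    PySem.Chars.split₀.go (padB b c) r a = a.reverse ++ cutGo r.reverse b c := by
  induction c with
  | nil =>
    intro b hlen r a
    have hb : b = [] := by cases b <;> simp_all
    subst hb
    show PySem.Chars.split₀.go [] r a = _
    unfold PySem.Chars.split₀.go
    rw [cutGo_base]
    by_cases h : r = []
    · subst h; simp
    · rw [if_neg (by simpa using h), if_neg (by simpa using h)]
      simp
  | cons y cs ih =>
    intro b hlen r a
    cases b with
    | nil => simp at hlen
    | cons n bs =>
      have hpad : padB (n :: bs) (y :: cs) = List.replicate n ' ' ++ y :: padB bs cs := by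
        simp [padB, List.zip_cons_cons, List.flatMap_cons]
      have hy : PySem.Chars.isspace y = false := hc y (by simp)
      have hlen' : bs.length = cs.length := by simpa using hlen
      have hc' : ∀ x ∈ cs, PySem.Chars.isspace x = false := fun x hx => hc x (by simp [hx])
      rw [hpad]
      cases n with
      | zero =>
        rw [List.replicate_zero, List.nil_append]
        conv_lhs => unfold PySem.Chars.split₀.go
        rw [if_neg (by simp [hy])]
        rw [ih hc' bs hlen' (y :: r) a]
        rw [cutGo_cons, if_pos rfl, List.reverse_cons]
      | succ m =>
        rw [List.replicate_succ, List.cons_append]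
        conv_lhs => unfold PySem.Chars.split₀.go
        rw [if_pos isspace_space]
        have hxgo : ∀ a', PySem.Chars.split₀.go (List.replicate m ' ' ++ y :: padB bs cs) [] a' =
            a'.reverse ++ cutGo [y].reverse bs cs := by
          intro a'
          rw [go_replicate]
          conv_lhs => unfold PySem.Chars.split₀.go
          rw [if_neg (by simp [hy])]
          exact ih hc' bs hlen' [y] a'
        by_cases hr : r = []
        · subst hr
          rw [if_pos (by rfl)]
          rw [hxgo, cutGo_cons, if_neg (by omega)]
          simp
        · rw [if_neg (by simpa using hr), hxgo, cutGo_cons, if_neg (by omega),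
            if_neg (show ¬(r.reverse = []) by simpa using hr)]
          simp

theorem split0_pad (c : List Char) (hc : ∀ x ∈ c, PySem.Chars.isspace x = false)
    (b : List Nat) (hlen : b.length = c.length) :
    PySem.Chars.split₀ (padB b c) = cutGo [] b c := by
  unfold PySem.Chars.split₀
  simpa using split_go_pad c hc b hlen [] []

theorem Waux_base (cur : List Char) : Waux cur [] = if cur = [] then [] else [cur] := rfl

theorem Waux_cons (cur : List Char) (x : Char) (cs : List Char) :
    Waux cur (x :: cs)
      = if PySem.Chars.isIn [x] vowelsConst then (if cur = [] then [] else [cur]) ++ Waux [x] cs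
        else Waux (cur ++ [x]) cs := rfl

theorem cutGo_eq_Waux (c : List Char) : ∀ (b : List Nat) (cur : List Char), b.length = c.length →
    (∀ i, i < c.length → ((b.getD i 0 ≠ 0) ↔ PySem.Chars.isIn [c.getD i ' '] vowelsConst = true)) →
    cutGo cur b c = Waux cur c := by
  induction c with
  | nil => intro b cur _ _; rw [cutGo_base, Waux_base]
  | cons x cs ih =>
    intro b cur hlen hb
    cases b with
    | nil => simp at hlen
    | cons n bs =>
      have h0 := hb 0 (by simp)
      simp only [List.getD_cons_zero] at h0
      have hshift : ∀ i, i < cs.length →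
          ((bs.getD i 0 ≠ 0) ↔ PySem.Chars.isIn [cs.getD i ' '] vowelsConst = true) := by
        intro i hi
        have := hb (i + 1) (by simpa using hi)
        simpa using this
      rw [cutGo_cons, Waux_cons]
      by_cases hv : PySem.Chars.isIn [x] vowelsConst = true
      · rw [if_pos hv, if_neg (h0.mpr hv)]
        rw [ih bs [x] (by simpa using hlen) hshift]
      · rw [if_neg hv]
        have hn : n = 0 := by
          by_contra hne
          exact hv (h0.mp hne)
        rw [if_pos hn]
        rw [ih bs (cur ++ [x]) (by simpa using hlen) hshift]

theorem cutGo_top (c : List Char) (b : List Nat) (hlen : b.length = c.length)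
    (hb : ∀ i, i < c.length → ((b.getD i 0 ≠ 0) ↔ (i ≠ 0 ∧ PySem.Chars.isIn [c.getD i ' '] vowelsConst = true))) :
    cutGo [] b c = Waux [] c := by
  cases c with
  | nil => rw [cutGo_base, Waux_base]
  | cons x cs =>
    cases b with
    | nil => simp at hlen
    | cons n bs =>
      have h0 := hb 0 (by simp)
      simp only [List.getD_cons_zero] at h0
      have hn : n = 0 := by
        by_contra hne
        exact absurd (h0.mp hne).1 (by simp)
      have hshift : ∀ i, i < cs.length →
          ((bs.getD i 0 ≠ 0) ↔ PySem.Chars.isIn [cs.getD i ' '] vowelsConst = true) := by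
        intro i hi
        have := hb (i + 1) (by simpa using hi)
        simpa using this
      rw [cutGo_cons, if_pos hn, show ([] : List Char) ++ [x] = [x] from rfl,
        cutGo_eq_Waux cs bs [x] (by simpa using hlen) hshift]
      rw [Waux_cons]
      by_cases hv : PySem.Chars.isIn [x] vowelsConst = true
      · rw [if_pos hv]
        simp
      · rw [if_neg hv]
        simp

theorem wfold (c : List Char) : ∀ (ws : List (List Char)) (cur : List Char),
    (if (c.foldl bCore (ws, cur)).2 = [] then (c.foldl bCore (ws, cur)).1
     else (c.foldl bCore (ws, cur)).1 ++ [(c.foldl bCore (ws, cur)).2])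
      = ws ++ Waux cur c := by
  induction c with
  | nil =>
    intro ws cur
    rw [Waux_base]
    by_cases h : cur = [] <;> simp [h]
  | cons x cs ih =>
    intro ws cur
    rw [Waux_cons]
    simp only [List.foldl_cons]
    by_cases hv : PySem.Chars.isIn [x] vowelsConst = true
    · have hb : bCore (ws, cur) x = ((if cur = [] then ws else ws ++ [cur]), [x]) := by
        unfold bCore
        rw [if_pos hv]
      rw [hb, if_pos hv, ih]
      by_cases h : cur = [] <;> simp [h]
    · have hb : bCore (ws, cur) x = (ws, cur ++ [x]) := by
        unfold bCore
        rw [if_neg hv]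
      rw [hb, if_neg hv, ih]

theorem rep_getD_zero (n i : Nat) : (List.replicate n (0 : Nat)).getD i 0 = 0 := by
  induction n generalizing i with
  | zero => simp
  | succ m ih =>
    cases i with
    | zero => simp [List.replicate_succ]
    | succ j => simp [List.replicate_succ]

theorem vowel_start_eq_alt (st : String) : vowel_start st = vowel_start_alt st := by
  simp only [vowel_start, vowel_start_alt]
  have hflat : PySem.Chars.join [] (PySem.Chars.split₀ st.toList)
      = st.toList.filter (fun c => !PySem.Chars.isspace c) := by
    rw [join_nil_flatten, split0_flatten]
  rw [hflat]
  have h0 := clean_fold (st.toList.filter (fun c => !PySem.Chars.isspace c)) []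
  simp only [List.map_nil, List.nil_append] at h0
  rw [h0, List.filter_filter]
  have hff : (st.toList.filter (fun a => PySem.Chars.isalnum a && !PySem.Chars.isspace a))
      = st.toList.filter PySem.Chars.isalnum := by
    apply List.filter_congr
    intro x _
    by_cases h : PySem.Chars.isalnum x = true
    · simp [h, isspace_false_of_alnum x h]
    · simp [h]
  rw [hff]
  set c : List Char := (st.toList.filter PySem.Chars.isalnum).map PySem.Chars.lowerChar with hcdef
  have hc : ∀ x ∈ c, PySem.Chars.isspace x = false := by
    intro x hx
    rw [hcdef] at hx
    obtain ⟨y, hy, rfl⟩ := List.mem_map.mp hx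
    exact isspace_false_lower_of_alnum y (List.of_mem_filter hy)
  -- the A-side loop
  obtain ⟨b', heq, hlen', hb0', hiff⟩ := loop2 c hc c hc (List.replicate c.length 0)
    (by simp) (rep_getD_zero _ _)
  rw [pad_zero] at heq
  rw [heq, split0_pad c hc b' hlen', cutGo_top c b' hlen' ?hb]
  case hb =>
    intro i hi
    rw [hiff i hi]
    have hmem : c.getD i ' ' ∈ c := by
      rw [List.getD_eq_getElem c ' ' hi]
      exact List.getElem_mem hi
    have hrep := rep_getD_zero c.length i
    constructor
    · rintro ⟨hne, hor⟩
      rcases hor with h | h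
      · exact absurd hrep h
      · exact ⟨hne, h.1⟩
    · rintro ⟨hne, hv⟩
      exact ⟨hne, Or.inr ⟨hv, hmem⟩⟩
  -- the B-side loop
  have hbfold : st.toList.foldl bStep ([], []) = c.foldl bCore ([], []) := by
    show st.toList.foldl
        (fun p ch => if PySem.Chars.isalnum ch then bCore p (PySem.Chars.lowerChar ch) else p)
        ([], []) = _
    rw [PySem.List.foldl_if_eq_foldl_filter, ← List.foldl_map]
  rw [hbfold, wfold c [] []]
  rfl

-- ===== VERDICT (by name: the statement is the Claim_ definition above) =====
theorem vowel_start_spec : Claim_equal_vowel_start := by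
  intro st _
  unfold Spec_vowel_start
  exact vowel_start_eq_alt st
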